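-- pv_equiv track=rewrite | github.com/dance-cmdr/ed-pioneer | src/extract_system_stats.py | detect_occupation_status
-- ===== SOURCE A (Python) =====
-- def detect_occupation_status(stations):
--     if not stations:
--         return "uncolonised"
--
--     has_colonised = False
--     has_colonising = False
--     has_regular_station = False
--
--     for s in stations:
--         market_id = str(s.get("market_id", ""))
--         station_type = s.get("type", "").lower()
--
--         if market_id.startswith("42") or "construction type" in station_type:
--             has_colonised = True
--         elif market_id.startswith("395") or market_id.startswith("396"):
--             if "construction" in station_type:
--                 has_colonising = True
--         else:
--             has_regular_station = True
--
--     if has_regular_station: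
--         return "occupied"
--     elif has_colonised:
--         return "colonised"
--     elif has_colonising:
--         return "colonising"
--     return "uncolonised"
-- ===== SOURCE B (Python) =====
-- def detect_occupation_status(stations):
--     def fields(s):
--         return str(s.get("market_id", "")), s.get("type", "").lower()
--
--     def is_colonised(s):
--         mid, st = fields(s)
--         return mid.startswith("42") or "construction type" in st
--
--     def is_colonising(s):
--         mid, st = fields(s)
--         return (not is_colonised(s)
--                 and (mid.startswith("395") or mid.startswith("396"))
--                 and "construction" in st)
--
--     def is_regular(s):
--         mid, _ = fields(s)
--         return not is_colonised(s) and not (mid.startswith("395") or mid.startswith("396"))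
--
--     if any(is_regular(s) for s in stations):
--         return "occupied"
--     if any(is_colonised(s) for s in stations):
--         return "colonised"
--     if any(is_colonising(s) for s in stations):
--         return "colonising"
--     return "uncolonised"
-- ===== Notes on version B (the rewrite author's own statement) =====
-- stated objective: idiomatic
-- what changed: Replaces the single flag-accumulating loop with three named per-station predicates resolved by priority-ordered short-circuiting any() scans.
import Mathlib
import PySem

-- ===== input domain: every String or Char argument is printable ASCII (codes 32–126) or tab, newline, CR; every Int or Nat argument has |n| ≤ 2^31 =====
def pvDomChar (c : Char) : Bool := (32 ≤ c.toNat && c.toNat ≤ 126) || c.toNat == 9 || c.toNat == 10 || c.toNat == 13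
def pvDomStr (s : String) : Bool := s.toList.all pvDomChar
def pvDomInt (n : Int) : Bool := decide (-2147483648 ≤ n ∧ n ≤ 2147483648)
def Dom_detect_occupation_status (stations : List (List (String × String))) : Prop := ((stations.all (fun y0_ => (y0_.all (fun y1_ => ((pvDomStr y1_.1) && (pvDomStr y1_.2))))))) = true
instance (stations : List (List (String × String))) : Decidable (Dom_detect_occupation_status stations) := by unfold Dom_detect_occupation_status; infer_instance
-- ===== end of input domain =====

-- B is the same O(n) classification, decomposed into named per-station predicates resolved by
-- priority-ordered any() scans instead of one flag-accumulating loop (objective: idiomatic).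

-- ===== PORT A =====
def detect_occupation_status (stations : List (List (String × String))) : String :=
  if stations = [] then "uncolonised"
  else
    let st := stations.foldl (fun (acc : Bool × Bool × Bool) s =>
      let market_id := PySem.Dict.getD (PySem.Dict.mk s) "market_id" ""
      let station_type := PySem.Str.lower (PySem.Dict.getD (PySem.Dict.mk s) "type" "")
      if PySem.Str.startswith market_id "42" || PySem.Str.isIn "construction type" station_type then
        (true, acc.2.1, acc.2.2)
      else if PySem.Str.startswith market_id "395" || PySem.Str.startswith market_id "396" then
        if PySem.Str.isIn "construction" station_type then (acc.1, true, acc.2.2) else acc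
      else (acc.1, acc.2.1, true)) (false, false, false)
    if st.2.2 then "occupied"
    else if st.1 then "colonised"
    else if st.2.1 then "colonising"
    else "uncolonised"

-- ===== PORT B =====
def pvFields (s : List (String × String)) : String × String :=
  (PySem.Dict.getD (PySem.Dict.mk s) "market_id" "", PySem.Str.lower (PySem.Dict.getD (PySem.Dict.mk s) "type" ""))

def pvIsColonised (s : List (String × String)) : Bool :=
  PySem.Str.startswith (pvFields s).1 "42" || PySem.Str.isIn "construction type" (pvFields s).2

def pvIsColonising (s : List (String × String)) : Bool :=
  !pvIsColonised s
    && (PySem.Str.startswith (pvFields s).1 "395" || PySem.Str.startswith (pvFields s).1 "396")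
    && PySem.Str.isIn "construction" (pvFields s).2

def pvIsRegular (s : List (String × String)) : Bool :=
  !pvIsColonised s
    && !(PySem.Str.startswith (pvFields s).1 "395" || PySem.Str.startswith (pvFields s).1 "396")

def detect_occupation_status_alt (stations : List (List (String × String))) : String :=
  if stations.any pvIsRegular then "occupied"
  else if stations.any pvIsColonised then "colonised"
  else if stations.any pvIsColonising then "colonising"
  else "uncolonised"

-- ===== PRECONDITION & SPEC =====
def Spec_detect_occupation_status (stations : List (List (String × String))) (out : String) : Prop := out = detect_occupation_status_alt stations
instance (stations : List (List (String × String))) (out : String) : Decidable (Spec_detect_occupation_status stations out) := by unfold Spec_detect_occupation_status; infer_instance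

-- ===== CLAIM (what is proved, stated in full; the proofs are below) =====
def Claim_equal_detect_occupation_status : Prop := ∀ (stations : List (List (String × String))), Dom_detect_occupation_status stations → Spec_detect_occupation_status stations (detect_occupation_status stations)

-- ===== LEMMAS AND PROOFS =====

-- A's loop state, characterised: each flag is an 'any' of the matching predicate, OR-ed onto its start value.
theorem pv_fold_char (l : List (List (String × String))) (c g r : Bool) :
    l.foldl (fun (acc : Bool × Bool × Bool) s =>
      let market_id := PySem.Dict.getD (PySem.Dict.mk s) "market_id" ""
      let station_type := PySem.Str.lower (PySem.Dict.getD (PySem.Dict.mk s) "type" "")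
      if PySem.Str.startswith market_id "42" || PySem.Str.isIn "construction type" station_type then
        (true, acc.2.1, acc.2.2)
      else if PySem.Str.startswith market_id "395" || PySem.Str.startswith market_id "396" then
        if PySem.Str.isIn "construction" station_type then (acc.1, true, acc.2.2) else acc
      else (acc.1, acc.2.1, true)) (c, g, r)
    = (c || l.any pvIsColonised, g || l.any pvIsColonising, r || l.any pvIsRegular) := by
  induction l generalizing c g r with
  | nil => simp
  | cons s t ih =>
    rw [List.foldl_cons]
    by_cases h1 : (PySem.Str.startswith (PySem.Dict.getD (PySem.Dict.mk s) "market_id" "") "42"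
        || PySem.Str.isIn "construction type" (PySem.Str.lower (PySem.Dict.getD (PySem.Dict.mk s) "type" ""))) = true
    · rw [if_pos h1, ih]
      simp only [List.any_cons, pvIsColonised, pvIsColonising, pvIsRegular, pvFields, h1,
        Bool.not_true, Bool.false_and, Bool.and_false, Bool.true_or, Bool.or_true,
        Bool.false_or, Bool.or_false, Bool.or_assoc]
    · by_cases h2 : (PySem.Str.startswith (PySem.Dict.getD (PySem.Dict.mk s) "market_id" "") "395"
          || PySem.Str.startswith (PySem.Dict.getD (PySem.Dict.mk s) "market_id" "") "396") = true
      · by_cases h3 : PySem.Str.isIn "construction" (PySem.Str.lower (PySem.Dict.getD (PySem.Dict.mk s) "type" "")) = true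
        · rw [if_neg h1, if_pos h2, if_pos h3, ih]
          simp only [List.any_cons, pvIsColonised, pvIsColonising, pvIsRegular, pvFields,
            eq_false_of_ne_true h1, h2, h3,
            Bool.not_true, Bool.not_false, Bool.false_and, Bool.true_and, Bool.and_true,
            Bool.and_false, Bool.true_or, Bool.or_true, Bool.false_or, Bool.or_false, Bool.or_assoc]
        · rw [if_neg h1, if_pos h2, if_neg h3, ih]
          simp only [List.any_cons, pvIsColonised, pvIsColonising, pvIsRegular, pvFields,
            eq_false_of_ne_true h1, eq_false_of_ne_true h3, h2,
            Bool.not_true, Bool.not_false, Bool.false_and, Bool.true_and, Bool.and_true,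
            Bool.and_false, Bool.true_or, Bool.or_true, Bool.false_or, Bool.or_false, Bool.or_assoc]
      · rw [if_neg h1, if_neg h2, ih]
        simp only [List.any_cons, pvIsColonised, pvIsColonising, pvIsRegular, pvFields,
          eq_false_of_ne_true h1, eq_false_of_ne_true h2,
          Bool.not_true, Bool.not_false, Bool.false_and, Bool.true_and, Bool.and_true,
          Bool.and_false, Bool.true_or, Bool.or_true, Bool.false_or, Bool.or_false, Bool.or_assoc]

-- ===== VERDICT (by name: the statement is the Claim_ definition above) =====
theorem detect_occupation_status_spec : Claim_equal_detect_occupation_status := by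
  intro stations _
  unfold Spec_detect_occupation_status detect_occupation_status detect_occupation_status_alt
  by_cases hnil : stations = []
  · subst hnil; simp
  · rw [if_neg hnil, pv_fold_char stations false false false]
    simp
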